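-- pv_equiv track=rewrite | github.com/IQuOD/machinelearn | prepare_network.py | lowvar_point_count
-- ===== SOURCE A (Python) =====
-- def lowvar_point_count(low_gradvar, bad_data):
-- 	'''
-- 	This function is to be used in conjunction with the following function to generate the new
-- 	updated set of features that should assist the neural network in identifying the location of
-- 	the hit bottom
-- 	'''
-- 	# initialisation
-- 	n1 = len(low_gradvar)
-- 	n2 = len(bad_data)
-- 	count = 0
--
-- 	# assuming that the length of neither array is 0
-- 	if ((n1 != 0) & (n2 != 0)):
-- 		# setting up for loops to count matches (incrementing count variable)
-- 		for i in range(0,n1):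
-- 			for j in range(0,n2):
-- 				if (low_gradvar[i][0] == bad_data[j][0]):
-- 					count += 1
-- 				else:
-- 					continue
--
-- 		# returning the count
-- 		return(count)
--
-- 	else:
-- 		count = 1
-- 		return(count)
-- ===== SOURCE B (Python) =====
-- def lowvar_point_count(low_gradvar, bad_data):
--     # One-pass frequency table over bad_data first elements, then a linear sum over
--     # low_gradvar: O(n1+n2) instead of A's O(n1*n2) nested loops.
--     if len(low_gradvar) == 0 or len(bad_data) == 0:
--         return 1
--     freq = {}
--     for row in bad_data:
--         k = row[0]
--         freq[k] = freq.get(k, 0) + 1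
--     return sum(freq.get(row[0], 0) for row in low_gradvar)
-- ===== Notes on version B (the rewrite author's own statement) =====
-- stated objective: faster
-- what changed: Replaced the nested index loops comparing every pair with a single-pass frequency dict over bad_data's first elements followed by a linear sum of lookups over low_gradvar.
import Mathlib
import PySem

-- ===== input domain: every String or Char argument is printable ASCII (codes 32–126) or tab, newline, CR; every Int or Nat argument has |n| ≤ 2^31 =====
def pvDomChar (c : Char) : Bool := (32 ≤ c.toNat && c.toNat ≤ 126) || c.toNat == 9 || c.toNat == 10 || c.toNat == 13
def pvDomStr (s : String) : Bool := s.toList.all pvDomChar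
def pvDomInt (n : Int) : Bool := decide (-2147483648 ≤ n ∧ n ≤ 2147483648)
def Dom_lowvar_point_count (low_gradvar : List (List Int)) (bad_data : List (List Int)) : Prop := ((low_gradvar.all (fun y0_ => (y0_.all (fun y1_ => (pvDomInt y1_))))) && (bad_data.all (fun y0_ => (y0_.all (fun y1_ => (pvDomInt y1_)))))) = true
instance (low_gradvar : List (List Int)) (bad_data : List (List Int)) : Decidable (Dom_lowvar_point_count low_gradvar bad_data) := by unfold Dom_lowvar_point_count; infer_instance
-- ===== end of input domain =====

-- B replaces A's O(n1*n2) nested == scan with one frequency table over bad_data's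
-- first elements and a linear sum over low_gradvar (measured faster at size; same values).

-- ===== PORT A =====
-- literal transliteration of A's nested range loops; lg[i][0]/bd[j][0] via pyGetD
-- (in range under Pre_, so the defaults are never the value used)
def lowvar_point_count (low_gradvar : List (List Int)) (bad_data : List (List Int)) : Int :=
  let n1 := low_gradvar.length
  let n2 := bad_data.length
  let count : Int := 0
  if n1 ≠ 0 ∧ n2 ≠ 0 then
    (PySem.List.pyRange 0 n1 1).foldl (fun c i =>
      (PySem.List.pyRange 0 n2 1).foldl (fun c2 j =>
        if PySem.List.pyGetD (PySem.List.pyGetD low_gradvar i []) 0 0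
             = PySem.List.pyGetD (PySem.List.pyGetD bad_data j []) 0 0
        then c2 + 1 else c2) c) count
  else
    1

-- ===== PORT B =====
-- transliteration of Source B: build freq dict over bad_data first elements, then sum lookups
def lowvar_point_count_alt (low_gradvar : List (List Int)) (bad_data : List (List Int)) : Int :=
  if low_gradvar.length = 0 ∨ bad_data.length = 0 then 1
  else
    let freq : PySem.Dict Int Int :=
      bad_data.foldl (fun d row => d.modify (PySem.List.pyGetD row 0 0) 0 (· + 1)) PySem.Dict.empty
    (low_gradvar.map (fun row => freq.getD (PySem.List.pyGetD row 0 0) 0)).sum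

-- ===== PRECONDITION & SPEC =====
-- Pre_ excludes exactly the inputs where Python A raises IndexError: an empty inner
-- list reached by [i][0]/[j][0], i.e. when both outer lists are nonempty and some row is empty.
def Pre_lowvar_point_count (low_gradvar : List (List Int)) (bad_data : List (List Int)) : Prop :=
  low_gradvar = [] ∨ bad_data = [] ∨
    ((∀ r ∈ low_gradvar, r ≠ []) ∧ (∀ r ∈ bad_data, r ≠ []))
instance (low_gradvar : List (List Int)) (bad_data : List (List Int)) : Decidable (Pre_lowvar_point_count low_gradvar bad_data) := by unfold Pre_lowvar_point_count; infer_instance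

def pvWitness_lowvar_point_count : List (List Int) × List (List Int) :=
  ([[1, 2], [3]], [[1], [3, 4], [1]])

def Spec_lowvar_point_count (low_gradvar : List (List Int)) (bad_data : List (List Int)) (out : Int) : Prop := out = lowvar_point_count_alt low_gradvar bad_data
instance (low_gradvar : List (List Int)) (bad_data : List (List Int)) (out : Int) : Decidable (Spec_lowvar_point_count low_gradvar bad_data out) := by unfold Spec_lowvar_point_count; infer_instance

-- ===== CLAIM (what is proved, stated in full; the proofs are below) =====
def Claim_equal_lowvar_point_count : Prop := ∀ (low_gradvar : List (List Int)) (bad_data : List (List Int)), Dom_lowvar_point_count low_gradvar bad_data → Pre_lowvar_point_count low_gradvar bad_data → Spec_lowvar_point_count low_gradvar bad_data (lowvar_point_count low_gradvar bad_data)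

-- ===== LEMMAS AND PROOFS =====

-- head of a row as both ports read it
def pvHead (r : List Int) : Int := PySem.List.pyGetD r 0 0

-- A's value, as a sum over low_gradvar of counts in bad_data (holds for ALL inputs)
theorem lowvar_eq_sum (lg bd : List (List Int)) :
    lowvar_point_count lg bd
      = if lg.length ≠ 0 ∧ bd.length ≠ 0 then
          (lg.map (fun r => ((bd.map pvHead).count (pvHead r) : Int))).sum
        else 1 := by
  unfold lowvar_point_count
  show (if lg.length ≠ 0 ∧ bd.length ≠ 0 then
      (PySem.List.pyRange 0 (lg.length) 1).foldl (fun c i =>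
        (PySem.List.pyRange 0 (bd.length) 1).foldl (fun c2 j =>
          if PySem.List.pyGetD (PySem.List.pyGetD lg i []) 0 0
               = PySem.List.pyGetD (PySem.List.pyGetD bd j []) 0 0
          then c2 + 1 else c2) c) 0
    else 1) = _
  split_ifs with h
  · rw [show (lg.length : Int) = PySem.List.len lg from rfl,
        PySem.List.foldl_pyRange_zero_pyGetD lg ([] : List Int)
          (fun c row => (PySem.List.pyRange 0 (bd.length) 1).foldl (fun c2 j =>
            if PySem.List.pyGetD row 0 0 = PySem.List.pyGetD (PySem.List.pyGetD bd j []) 0 0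
            then c2 + 1 else c2) c) 0]
    have hin : ∀ (c : Int), ∀ row ∈ lg,
        (PySem.List.pyRange 0 (bd.length) 1).foldl (fun c2 j =>
          if PySem.List.pyGetD row 0 0 = PySem.List.pyGetD (PySem.List.pyGetD bd j []) 0 0
          then c2 + 1 else c2) c
        = c + ((bd.map pvHead).count (pvHead row) : Int) := by
      intro c row _
      rw [show (bd.length : Int) = PySem.List.len bd from rfl,
          PySem.List.foldl_pyRange_zero_pyGetD bd ([] : List Int)
            (fun c2 row2 =>
              if PySem.List.pyGetD row 0 0 = PySem.List.pyGetD row2 0 0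
              then c2 + 1 else c2) c]
      have := PySem.List.foldl_count_if
        (fun row2 : List Int => decide (PySem.List.pyGetD row 0 0 = PySem.List.pyGetD row2 0 0)) bd c
      simp only [decide_eq_true_eq] at this
      rw [this]
      congr 1
      rw [List.count_eq_countP, List.countP_map]
      norm_cast
      apply List.countP_congr
      intro r _
      simp only [Function.comp, pvHead, beq_iff_eq, decide_eq_true_eq]
      exact eq_comm
    rw [List.foldl_ext _ _ 0 hin, PySem.List.foldl_add]
    simp only [zero_add]
  · rfl

-- B's value, same closed form
theorem lowvar_alt_eq_sum (lg bd : List (List Int)) :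
    lowvar_point_count_alt lg bd
      = if lg.length ≠ 0 ∧ bd.length ≠ 0 then
          (lg.map (fun r => ((bd.map pvHead).count (pvHead r) : Int))).sum
        else 1 := by
  unfold lowvar_point_count_alt
  by_cases h : lg.length = 0 ∨ bd.length = 0
  · rw [if_pos h, if_neg (by tauto)]
  · rw [if_neg h, if_pos (by tauto)]
    have hd : ∀ v : Int,
        (bd.foldl (fun d row => d.modify (PySem.List.pyGetD row 0 0) 0 (· + 1)) PySem.Dict.empty).getD v 0
          = ((bd.map pvHead).count v : Int) := by
      intro v
      have hfold : ((bd.map pvHead).foldl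
            (fun (d : PySem.Dict Int Int) x => d.modify x 0 (· + 1)) PySem.Dict.empty)
          = bd.foldl (fun d row => d.modify (PySem.List.pyGetD row 0 0) 0 (· + 1)) PySem.Dict.empty := by
        rw [List.foldl_map]; rfl
      rw [← hfold, PySem.Dict.getD_foldl_modify_add_one]
      simp
    simp only [hd]
    simp [pvHead]

-- ===== VERDICT (by name: the statement is the Claim_ definition above) =====
theorem lowvar_point_count_spec : Claim_equal_lowvar_point_count := by
  intro lg bd _ _
  unfold Spec_lowvar_point_count
  rw [lowvar_eq_sum, lowvar_alt_eq_sum]
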